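-- pv_equiv track=rewrite | github.com/vasi0707/Bioinformatics | Practical 4/BS19B032-Q2-score_calculate.py | gap_find
-- ===== SOURCE A (Python) =====
-- def gap_find(seq):
--     gap_count=0
--     flag=0
--     for i in range(len(seq)):
--         if(seq[i]=='-'):
--             if(flag==0):
--                 gap_count=gap_count+1
--                 flag=1
--         else:
--             flag=0
--     return gap_count
-- ===== SOURCE B (Python) =====
-- def gap_find(seq):
--     # Count gap runs as "rising edges": positions where a '-' starts a new run,
--     # via a stateless pairwise scan instead of an explicit flag machine.
--     if not seq:
--         return 0
--     return (seq[0] == '-') + sum(a != '-' and b == '-' for a, b in zip(seq, seq[1:]))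
-- ===== Notes on version B (the rewrite author's own statement) =====
-- stated objective: idiomatic
-- what changed: B replaces A's stateful index loop with a flag by a stateless pairwise comprehension: a run of '-' is counted at its rising edge (first char, or a non-'-' followed by '-') via zip(seq, seq[1:]).
import Mathlib
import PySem

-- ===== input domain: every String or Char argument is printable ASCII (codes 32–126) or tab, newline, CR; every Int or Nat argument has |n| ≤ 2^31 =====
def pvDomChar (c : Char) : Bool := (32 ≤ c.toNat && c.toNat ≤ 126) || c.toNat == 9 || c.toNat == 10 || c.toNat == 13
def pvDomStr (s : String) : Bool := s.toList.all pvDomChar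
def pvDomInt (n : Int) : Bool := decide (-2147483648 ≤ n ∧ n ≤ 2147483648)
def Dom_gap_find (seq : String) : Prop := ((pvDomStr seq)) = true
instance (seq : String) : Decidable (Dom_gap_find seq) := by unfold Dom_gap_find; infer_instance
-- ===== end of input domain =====

-- B counts each gap run at its rising edge by a stateless pairwise scan (idiomatic rewrite; return values identical).

-- ===== PORT A =====
-- index loop over range(len(seq)) with a flag tracking "inside a gap run"
def gap_find (seq : String) : Int :=
  let st :=
    (PySem.List.pyRange 0 (PySem.Str.len seq) 1).foldl
      (fun (st : Int × Int) i =>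
        if PySem.List.pyGetD seq.toList i ' ' = '-' then
          if st.2 = 0 then (st.1 + 1, 1) else st
        else (st.1, 0))
      (0, 0)
  st.1

-- ===== PORT B =====
-- (seq[0] == '-') + sum over zip(seq, seq[1:]) of (a != '-' and b == '-')
def gap_find_alt (seq : String) : Int :=
  match seq.toList with
  | [] => 0
  | c :: _ =>
    (if c = '-' then 1 else 0) +
    ((seq.toList.zip (PySem.List.slice seq.toList (some 1) none)).countP
      (fun p => p.1 != '-' && p.2 == '-') : Int)

-- ===== PRECONDITION & SPEC =====
def Spec_gap_find (seq : String) (out : Int) : Prop := out = gap_find_alt seq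
instance (seq : String) (out : Int) : Decidable (Spec_gap_find seq out) := by unfold Spec_gap_find; infer_instance

-- ===== CLAIM (what is proved, stated in full; the proofs are below) =====
def Claim_equal_gap_find : Prop := ∀ (seq : String), Dom_gap_find seq → Spec_gap_find seq (gap_find seq)

-- ===== LEMMAS AND PROOFS =====

-- number of gap-run starts in cs, given whether a '-' at the head would start a new run
def pvE : List Char → Bool → Int
  | [], _ => 0
  | c :: cs, canStart =>
    if c = '-' then (if canStart then 1 else 0) + pvE cs false else pvE cs true

-- A's loop adds to the accumulator exactly the number of run starts
theorem pvE_loopA (cs : List Char) (g flag : Int) :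
    (cs.foldl
      (fun (st : Int × Int) c =>
        if c = '-' then if st.2 = 0 then (st.1 + 1, 1) else st else (st.1, 0))
      (g, flag)).1 = g + pvE cs (flag == 0) := by
  induction cs generalizing g flag with
  | nil => simp [pvE]
  | cons c cs ih =>
    simp only [List.foldl_cons, pvE]
    by_cases hc : c = '-'
    · by_cases hf : flag = 0
      · simp [hc, hf, ih]; ring
      · have h0 : (flag == 0) = false := by simp [hf]
        simp [hc, hf, ih, h0]
    · simp [hc, ih]

-- run starts equal rising edges counted on consecutive pairs
theorem pvE_pairs (cs : List Char) (c : Char) :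
    pvE cs (c != '-') =
      (((c :: cs).zip cs).countP (fun p => p.1 != '-' && p.2 == '-') : Int) := by
  induction cs generalizing c with
  | nil => simp [pvE]
  | cons d rest ih =>
    have hrec := ih d
    simp only [List.zip_cons_cons, List.countP_cons]
    by_cases hd : d = '-'
    · subst hd
      simp only [bne_self_eq_false] at hrec
      by_cases hc : c = '-'
      · simp [pvE, hc, hrec]
      · simp [pvE, hc, hrec]; ring
    · have hne : (d != '-') = true := by simp [hd]
      rw [hne] at hrec
      simp [pvE, hd, hrec]

-- ===== VERDICT (by name: the statement is the Claim_ definition above) =====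
theorem gap_find_spec : Claim_equal_gap_find := by
  intro seq _
  show gap_find seq = gap_find_alt seq
  unfold gap_find gap_find_alt
  rw [PySem.List.slice_from_one]
  have := PySem.List.foldl_pyRange_zero_pyGetD seq.toList ' '
    (fun (st : Int × Int) c =>
      if c = '-' then if st.2 = 0 then (st.1 + 1, 1) else st else (st.1, 0))
    ((0 : Int), (0 : Int))
  simp only [PySem.Str.len_eq] at this ⊢
  simp only [PySem.List.len_eq] at this
  rw [this, pvE_loopA]
  cases h : seq.toList with
  | nil => simp [pvE]
  | cons c rest =>
    simp only [List.tail_cons]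
    by_cases hc : c = '-'
    · subst hc
      have hp := pvE_pairs rest '-'
      simp only [bne_self_eq_false] at hp
      simp [pvE, hp]
    · have hp := pvE_pairs rest c
      rw [show (c != '-') = true from by simp [hc]] at hp
      simp [pvE, hc, hp]
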